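-- pv_equiv track=rewrite | github.com/pgarrett-scripps/peptacular | peptacular/peptide.py | create_modified_peptide
-- ===== SOURCE A (Python) =====
-- def create_modified_peptide(unmodified_sequence: str, modifications: dict[int, str]) -> str:
--     """
--     Creates a modified peptide sequence from an unmodified peptide sequence and a dictionary of modifications.
--
--     The modifications are specified as a dictionary where the keys are the indices of the modified amino acids
--     in the peptide sequence, and the values are the modifications to apply at those indices. The modifications are
--     added to the peptide sequence in descending order of index, so that the indices remain valid after each
--     modification is applied.
--
--     :param unmodified_sequence: The unmodified peptide sequence
--     :param modifications: The modifications to apply to the peptide sequence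
--     :return: The modified peptide sequence
--     :raises ValueError: If the index of a modification is invalid for the given peptide sequence
--     """
--
--     modified_sequence = []
--     prev_index = 0
--
--     # Sort the modifications by index in descending order
--     for i, mod in sorted(modifications.items()):
--
--         if i < 0 or i >= len(unmodified_sequence):
--             raise ValueError(f'Index of modification: {i} is invalid for peptide sequence: {unmodified_sequence}')
--
--         # Insert the modification into the modified peptide sequence
--         modified_sequence.append(unmodified_sequence[prev_index: i + 1])
--         modified_sequence.append(f"({mod})")
--         prev_index = i + 1
--
--     modified_sequence.append(unmodified_sequence[prev_index:])
--     return ''.join(modified_sequence)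
-- ===== SOURCE B (Python) =====
-- def create_modified_peptide(unmodified_sequence: str, modifications: dict[int, str]) -> str:
--     # Validate all modification indices up front (ascending, so the first bad
--     # index reported matches the sorted-order check).
--     for i in sorted(modifications):
--         if i < 0 or i >= len(unmodified_sequence):
--             raise ValueError(f'Index of modification: {i} is invalid for peptide sequence: {unmodified_sequence}')
--
--     parts = []
--     for i, aa in enumerate(unmodified_sequence):
--         parts.append(aa)
--         if i in modifications:
--             parts.append(f"({modifications[i]})")
--     return ''.join(parts)
-- ===== Notes on version B (the rewrite author's own statement) =====
-- stated objective: idiomatic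
-- what changed: B validates all indices up front and then builds the result by walking every position of the sequence with a dict lookup per position, instead of A's single pass over the sorted modification items that concatenates slices between consecutive modification indices.
import Mathlib
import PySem

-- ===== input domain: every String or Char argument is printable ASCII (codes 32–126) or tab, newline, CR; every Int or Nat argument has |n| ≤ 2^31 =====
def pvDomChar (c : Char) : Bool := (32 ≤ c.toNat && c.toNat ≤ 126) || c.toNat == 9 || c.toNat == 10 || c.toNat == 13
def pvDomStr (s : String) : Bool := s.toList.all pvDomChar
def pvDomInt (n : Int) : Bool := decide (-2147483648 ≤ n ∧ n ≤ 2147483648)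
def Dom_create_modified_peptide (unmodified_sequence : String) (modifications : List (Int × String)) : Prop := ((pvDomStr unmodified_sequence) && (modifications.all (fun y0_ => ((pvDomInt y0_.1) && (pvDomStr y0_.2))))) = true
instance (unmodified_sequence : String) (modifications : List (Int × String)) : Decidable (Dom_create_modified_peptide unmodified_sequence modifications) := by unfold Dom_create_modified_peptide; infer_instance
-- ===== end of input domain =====

-- B validates all indices first, then walks every position of the sequence with a dict
-- lookup per position (idiomatic), instead of A's slicing between sorted modification
-- indices; both raise the same ValueError, which Pre_ excludes.


-- ===== PORT A =====
-- the loop `for i, mod in sorted(modifications.items()): …`; the `raise ValueError`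
-- branch (excluded by Pre_) is ported as returning [].
def pvGoA (s : List Char) : List (Int × String) → List Char → Int → List Char
  | [], acc, prev => acc ++ PySem.List.slice s (some prev) none
  | (i, m) :: rest, acc, prev =>
    if i < 0 ∨ (s.length : Int) ≤ i then []  -- Python: raise ValueError (Pre_ excludes)
    else pvGoA s rest
      (acc ++ PySem.List.slice s (some prev) (some (i + 1)) ++ ('(' :: m.toList ++ [')']))
      (i + 1)

def create_modified_peptide (unmodified_sequence : String) (modifications : List (Int × String)) : String :=
  -- dict keys are distinct, so sorted(modifications.items()) (lexicographic on the
  -- pairs) is exactly the sort by key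
  String.mk (pvGoA unmodified_sequence.toList
    (PySem.List.sorted (PySem.Dict.ofList modifications).items (fun p => p.1) false) [] 0)

-- ===== PORT B =====
def create_modified_peptide_alt (unmodified_sequence : String) (modifications : List (Int × String)) : String :=
  let s := unmodified_sequence.toList
  let d := PySem.Dict.ofList modifications
  -- `for i in sorted(modifications): if i < 0 or i >= len(...): raise ValueError`
  if (PySem.List.sorted d.keys (fun k => k) false).any
      (fun i => decide (i < 0) || decide ((s.length : Int) ≤ i)) then
    ""  -- Python: raise ValueError (Pre_ excludes)
  else
    -- `for i, aa in enumerate(...): parts.append(aa); if i in modifications: …`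
    String.mk ((PySem.List.enumerate s).foldl
      (fun acc p =>
        acc ++ p.2 :: (match d.get? p.1 with
          | some m => '(' :: m.toList ++ [')']
          | none => [])) [])

-- ===== PRECONDITION & SPEC =====
-- Pre_ excludes exactly the inputs where A raises ValueError: a modification index
-- that is negative or ≥ the sequence length.
def Pre_create_modified_peptide (unmodified_sequence : String) (modifications : List (Int × String)) : Prop :=
  ∀ p ∈ modifications, 0 ≤ p.1 ∧ p.1 < (unmodified_sequence.toList.length : Int)
instance (unmodified_sequence : String) (modifications : List (Int × String)) : Decidable (Pre_create_modified_peptide unmodified_sequence modifications) := by unfold Pre_create_modified_peptide; infer_instance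

def pvWitness_create_modified_peptide : String × (List (Int × String)) := ("PEPTIDE", [(1, "ox"), (4, "1.5")])

def Spec_create_modified_peptide (unmodified_sequence : String) (modifications : List (Int × String)) (out : String) : Prop := out = create_modified_peptide_alt unmodified_sequence modifications
instance (unmodified_sequence : String) (modifications : List (Int × String)) (out : String) : Decidable (Spec_create_modified_peptide unmodified_sequence modifications out) := by unfold Spec_create_modified_peptide; infer_instance

-- ===== CLAIM (what is proved, stated in full; the proofs are below) =====
def Claim_equal_create_modified_peptide : Prop := ∀ (unmodified_sequence : String) (modifications : List (Int × String)), Dom_create_modified_peptide unmodified_sequence modifications → Pre_create_modified_peptide unmodified_sequence modifications → Spec_create_modified_peptide unmodified_sequence modifications (create_modified_peptide unmodified_sequence modifications)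

-- ===== LEMMAS AND PROOFS =====

-- "(mod)" as a char list, from an optional modification
def pvWrap : Option String → List Char
  | some m => '(' :: m.toList ++ [')']
  | none => []

-- a stretch of positions with no modification contributes just the characters
lemma pvEnum_none (d : PySem.Dict Int String) :
    ∀ (u : List Char) (k : Nat), (∀ j : Nat, k ≤ j → d.get? (j : Int) = none) →
    (PySem.List.enumerate u (k : Int)).flatMap (fun p => p.2 :: pvWrap (d.get? p.1)) = u := by
  intro u
  induction u with
  | nil => intro k h; simp [PySem.List.enumerate]
  | cons c t ih =>
    intro k h
    have hk : ((k : Int) + 1) = ((k + 1 : Nat) : Int) := by push_cast; ring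
    simp only [PySem.List.enumerate, List.flatMap_cons]
    rw [h k le_rfl, hk, ih (k + 1) (fun j hj => h j (by omega))]
    simp [pvWrap]

-- peeling the part of the walk up to (and including) the next modified position n
lemma pvEnum_split (s : List Char) (d : PySem.Dict Int String) (m : String) :
    ∀ (fuel prev n : Nat), n - prev = fuel → prev ≤ n → n < s.length →
    (∀ j : Nat, prev ≤ j → j < n → d.get? (j : Int) = none) →
    d.get? (n : Int) = some m →
    (PySem.List.enumerate (s.drop prev) (prev : Int)).flatMap (fun p => p.2 :: pvWrap (d.get? p.1)) =
      ((s.drop prev).take (n + 1 - prev)) ++ ('(' :: m.toList ++ [')']) ++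
      (PySem.List.enumerate (s.drop (n + 1)) ((n + 1 : Nat) : Int)).flatMap (fun p => p.2 :: pvWrap (d.get? p.1)) := by
  intro fuel
  induction fuel with
  | zero =>
    intro prev n hf hpn hn hnone hm
    have hpe : prev = n := by omega
    subst hpe
    have hdrop : s.drop prev = s[prev] :: s.drop (prev + 1) := List.drop_eq_getElem_cons hn
    rw [hdrop]
    simp only [PySem.List.enumerate, List.flatMap_cons]
    have h1 : ((prev : Int) + 1) = ((prev + 1 : Nat) : Int) := by push_cast; ring
    rw [hm, h1]
    simp only [pvWrap]
    rw [show prev + 1 - prev = 1 from by omega]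
    simp
    rw [show List.take 1 (List.drop prev s) = [s[prev]] from by rw [hdrop]; rfl]
    rfl
  | succ fuel ih =>
    intro prev n hf hpn hn hnone hm
    have hplt : prev < n := by omega
    have hps : prev < s.length := by omega
    have hdrop : s.drop prev = s[prev] :: s.drop (prev + 1) := List.drop_eq_getElem_cons hps
    rw [hdrop]
    simp only [PySem.List.enumerate, List.flatMap_cons]
    have h1 : ((prev : Int) + 1) = ((prev + 1 : Nat) : Int) := by push_cast; ring
    rw [hnone prev le_rfl hplt, h1,
      ih (prev + 1) n (by omega) (by omega) hn (fun j hj hjn => hnone j (by omega) hjn) hm]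
    have htake : n + 1 - prev = (n + 1 - (prev + 1)) + 1 := by omega
    rw [htake, ← hdrop]
    have : (s.drop prev).take ((n + 1 - (prev + 1)) + 1) = s[prev] :: (s.drop (prev + 1)).take (n + 1 - (prev + 1)) := by
      rw [hdrop]; rfl
    rw [this]
    simp [pvWrap]

-- the main loop invariant: A's slicing loop equals B's per-position walk from `prev` on,
-- provided the remaining items are exactly d's entries at positions ≥ prev, in increasing order
lemma pvGoA_eq (s : List Char) (d : PySem.Dict Int String) :
    ∀ (items : List (Int × String)) (acc : List Char) (prev : Nat),
    (∀ p ∈ items, (prev : Int) ≤ p.1 ∧ p.1 < (s.length : Int)) →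
    items.Pairwise (fun a b => a.1 < b.1) →
    (∀ j : Int, (prev : Int) ≤ j → d.get? j = (PySem.Dict.mk items).get? j) →
    pvGoA s items acc (prev : Int) =
      acc ++ (PySem.List.enumerate (s.drop prev) (prev : Int)).flatMap (fun p => p.2 :: pvWrap (d.get? p.1)) := by
  intro items
  induction items with
  | nil =>
    intro acc prev hrange hpair hget
    have hnone : ∀ j : Nat, prev ≤ j → d.get? (j : Int) = none := by
      intro j hj
      rw [hget (j : Int) (by exact_mod_cast hj)]
      rfl
    rw [pvEnum_none d (s.drop prev) prev hnone]
    simp [pvGoA, PySem.List.slice_from s (Int.natCast_nonneg prev)]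
  | cons hd rest ih =>
    intro acc prev hrange hpair hget
    obtain ⟨i, m⟩ := hd
    obtain ⟨hple, hlt⟩ := hrange (i, m) (List.mem_cons_self)
    have h0i : 0 ≤ i := le_trans (by positivity) hple
    set n := i.toNat with hn
    have hin : i = (n : Int) := by omega
    have hnlt : n < s.length := by omega
    have hpn : prev ≤ n := by omega
    have hguard : ¬ (i < 0 ∨ (s.length : Int) ≤ i) := by omega
    rw [pvGoA, if_neg hguard]
    have hrest : ∀ p ∈ rest, ((n + 1 : Nat) : Int) ≤ p.1 ∧ p.1 < (s.length : Int) := by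
      intro p hp
      refine ⟨?_, (hrange p (List.mem_cons_of_mem _ hp)).2⟩
      have := (List.pairwise_cons.mp hpair).1 p hp
      omega
    have hgetrest : ∀ j : Int, ((n + 1 : Nat) : Int) ≤ j → d.get? j = (PySem.Dict.mk rest).get? j := by
      intro j hj
      rw [hget j (by omega)]
      rw [PySem.Dict.get?_mk_cons]
      have : (i == j) = false := by simp; omega
      simp [this]
    have hsucc : i + 1 = ((n + 1 : Nat) : Int) := by omega
    rw [hsucc, ih _ (n + 1) hrest (List.pairwise_cons.mp hpair).2 hgetrest]
    -- now split the B-side walk at position n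
    have hnone : ∀ j : Nat, prev ≤ j → j < n → d.get? (j : Int) = none := by
      intro j hj hjn
      rw [hget (j : Int) (by exact_mod_cast hj), PySem.Dict.get?_mk_cons]
      have : (i == (j : Int)) = false := by simp; omega
      simp only [this, if_neg Bool.false_ne_true]
      rw [PySem.Dict.get?_eq_none_iff_not_mem_keys]
      intro hmem
      have : ∃ p ∈ rest, p.1 = (j : Int) := by
        simpa [PySem.Dict.keys, List.mem_map] using hmem
      obtain ⟨p, hp, hpj⟩ := this
      have := (List.pairwise_cons.mp hpair).1 p hp
      omega
    have hsome : d.get? (n : Int) = some m := by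
      rw [hget (n : Int) (by exact_mod_cast hpn), PySem.Dict.get?_mk_cons]
      have : (i == (n : Int)) = true := by simp [hin]
      simp [this]
    rw [pvEnum_split s d m (n - prev) prev n rfl hpn hnlt hnone hsome]
    have hslice : PySem.List.slice s (some (prev : Int)) (some ((n + 1 : Nat) : Int)) = (s.drop prev).take (n + 1 - prev) := by
      exact PySem.List.slice_natCast s prev (n + 1)
    rw [hslice]
    simp

-- ===== VERDICT (by name: the statement is the Claim_ definition above) =====
theorem create_modified_peptide_spec : Claim_equal_create_modified_peptide := by
  intro us mods _hdom hpre
  unfold Spec_create_modified_peptide create_modified_peptide create_modified_peptide_alt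
  set s := us.toList with hs
  set d := PySem.Dict.ofList mods with hd
  -- every key of d is a key of mods, hence in range
  have hkey : ∀ k ∈ d.keys, 0 ≤ k ∧ k < (s.length : Int) := by
    intro k hk
    have hk' : k ∈ mods.map (·.1) := by
      have := PySem.Dict.keys_foldl_insert_key mods (·.1) (fun _ x => x.2) PySem.Dict.empty
      rw [hd] at hk
      unfold PySem.Dict.ofList PySem.Dict.update at hk
      rw [this] at hk
      rcases (PySem.Set.mem_union _ _ _).mp hk with h | h
      · simp [PySem.Dict.keys_empty] at h
      · exact h
    obtain ⟨p, hp, hpk⟩ := List.mem_map.mp hk'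
    rw [← hpk]
    exact hpre p hp
  -- B's validation loop finds nothing
  have hguard : (PySem.List.sorted d.keys (fun k => k) false).any
      (fun i => decide (i < 0) || decide ((s.length : Int) ≤ i)) = false := by
    rw [List.any_eq_false]
    intro k hk
    have := hkey k ((PySem.List.mem_sorted _ _ _ _).mp hk)
    simp; omega
  rw [if_neg (by simp [hguard])]
  -- rewrite B's foldl as a flatMap
  rw [PySem.List.foldl_append_eq_flatMap
    (fun p => p.2 :: (match d.get? p.1 with
      | some m => '(' :: m.toList ++ [')'] | none => [])) (PySem.List.enumerate s) []]
  have hfun : (fun (p : Int × Char) => p.2 :: (match d.get? p.1 with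
      | some m => '(' :: m.toList ++ [')'] | none => []))
      = fun p => p.2 :: pvWrap (d.get? p.1) := by
    funext p; cases d.get? p.1 <;> rfl
  rw [hfun]
  -- set up the main lemma at prev = 0
  set items := PySem.List.sorted d.items (fun p => p.1) false with hitems
  have hperm : items.Perm d.items := PySem.List.sorted_perm _ _ _
  have hnodup : (items.map (·.1)).Nodup := by
    have h1 : (items.map (·.1)).Perm d.keys := hperm.map _
    exact (PySem.Dict.nodup_keys_ofList mods).perm h1.symm
  have hpair : items.Pairwise (fun a b => a.1 < b.1) := by
    have h1 : items.Pairwise (fun a b => a.1 ≤ b.1) := PySem.List.sorted_pairwise d.items (fun p => p.1)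
    have h2 : items.Pairwise (fun a b => a.1 ≠ b.1) := (List.pairwise_map).mp hnodup
    exact (h1.and h2).imp (fun h => lt_of_le_of_ne h.1 h.2)
  have hrange : ∀ p ∈ items, ((0 : Nat) : Int) ≤ p.1 ∧ p.1 < (s.length : Int) := by
    intro p hp
    have : p.1 ∈ d.keys := PySem.Dict.mem_keys_of_mem_items d (hperm.mem_iff.mp hp)
    simpa using hkey p.1 this
  have hget : ∀ j : Int, ((0 : Nat) : Int) ≤ j → d.get? j = (PySem.Dict.mk items).get? j := by
    intro j _
    cases hdj : d.get? j with
    | some v =>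
      have hmem : (j, v) ∈ d.items :=
        (PySem.Dict.get?_eq_some_iff_mem_items d j v (PySem.Dict.nodup_keys_ofList mods)).mp hdj
      exact ((PySem.Dict.get?_eq_some_iff_mem_items (PySem.Dict.mk items) j v hnodup).mpr
        (hperm.mem_iff.mpr hmem)).symm
    | none =>
      symm
      rw [PySem.Dict.get?_eq_none_iff_not_mem_keys] at hdj ⊢
      intro hmem
      exact hdj (((hperm.map (·.1)).mem_iff).mp hmem)
  have := pvGoA_eq s d items [] 0 hrange hpair hget
  rw [show ((0 : Nat) : Int) = (0 : Int) by norm_num] at this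
  rw [this]
  simp
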